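-- pv_equiv track=rewrite | github.com/bruso4eg57-afk/postavkaozonwb2 | src/services/normalize.py | _pick_field
-- ===== SOURCE A (Python) =====
-- from typing import Any
--
-- def _canonicalize_key(key: str) -> str:
--     return str(key).strip().lower().replace(" ", "").replace("_", "")
--
-- def _pick_field(row: dict[str, Any], candidates: list[str], default: Any = "") -> Any:
--     if not candidates:
--         return default
--     cmap = {_canonicalize_key(k): v for k, v in row.items()}
--     for c in candidates:
--         ck = _canonicalize_key(c)
--         if ck in cmap and cmap[ck] not in (None, ""):
--             return cmap[ck]
--     return default
-- ===== SOURCE B (Python) =====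
-- def _canonicalize_key(key: str) -> str:
--     return str(key).strip().lower().replace(" ", "").replace("_", "")
--
--
-- def _pick_field(row: dict, candidates: list, default=""):
--     # Inverted indexing: one pass over row filling a candidate-indexed slot
--     # array (later row items overwrite, so the last matching key wins), then
--     # return the first slot holding a non-empty value.
--     canon = [_canonicalize_key(c) for c in candidates]
--     canonset = set(canon)
--     slots = [None] * len(canon)
--     for k, v in row.items():
--         ck = _canonicalize_key(k)
--         if ck not in canonset:
--             continue
--         for i in range(len(canon)):
--             if canon[i] == ck:
--                 slots[i] = v
--     for s in slots:
--         if s not in (None, ""):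
--             return s
--     return default
-- ===== Notes on version B (the rewrite author's own statement) =====
-- stated objective: alternative
-- what changed: Inverts the data flow: instead of building a canonical-key dict from the row and probing it per candidate, B makes a single pass over the row filling a candidate-indexed slot array (later row items overwrite, so the last matching key wins) and then returns the first non-empty slot.
import Mathlib
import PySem

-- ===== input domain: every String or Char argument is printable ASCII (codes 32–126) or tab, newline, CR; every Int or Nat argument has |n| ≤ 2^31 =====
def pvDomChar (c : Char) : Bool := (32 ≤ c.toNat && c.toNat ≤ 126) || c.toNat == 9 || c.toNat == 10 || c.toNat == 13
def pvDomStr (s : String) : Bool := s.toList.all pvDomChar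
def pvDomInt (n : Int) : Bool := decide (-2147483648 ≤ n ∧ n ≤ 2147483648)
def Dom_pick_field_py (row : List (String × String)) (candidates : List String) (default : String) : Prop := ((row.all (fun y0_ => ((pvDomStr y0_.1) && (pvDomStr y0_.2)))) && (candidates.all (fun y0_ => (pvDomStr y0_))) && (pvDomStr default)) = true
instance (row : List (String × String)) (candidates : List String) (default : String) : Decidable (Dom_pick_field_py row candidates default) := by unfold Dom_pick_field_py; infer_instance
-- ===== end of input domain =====

-- B inverts A's data flow: one pass over the row fills a candidate-indexed slot
-- array (last matching row key wins), then the first non-empty slot is returned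
-- (alternative decomposition, no speed claim).

-- ===== PORT A =====
-- _canonicalize_key (shared helper of both Pythons)
def canonKey (s : String) : String :=
  PySem.Str.replace (PySem.Str.replace (PySem.Str.lower (PySem.Str.strip s)) " " "") "_" ""

-- the 'for c in candidates' loop of A
def pickLoopA (cmap : PySem.Dict String String) (cs : List String) (default : String) : String :=
  match cs with
  | [] => default
  | c :: rest =>
    let ck := canonKey c
    match cmap.get? ck with
    | some v => if v ≠ "" then v else pickLoopA cmap rest default
    | none => pickLoopA cmap rest default

def pick_field_py (row : List (String × String)) (candidates : List String) (default : String) : String :=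
  if candidates = [] then default
  else
    let cmap : PySem.Dict String String :=
      row.foldl (fun d p => d.insert (canonKey p.1) p.2) PySem.Dict.empty
    pickLoopA cmap candidates default

-- ===== PORT B =====
-- inner 'for i in range(len(canon)): if canon[i] == ck: slots[i] = v' —
-- per-slot update written as a map over the (canon, slots) pairs
def updateSlots (canon : List String) (slots : List (Option String)) (ck v : String) : List (Option String) :=
  (canon.zip slots).map (fun p => if p.1 = ck then some v else p.2)

-- final 'for s in slots: if s not in (None, ""): return s'
def firstSlot (slots : List (Option String)) (default : String) : String :=
  match slots with
  | [] => default
  | some s :: rest => if s ≠ "" then s else firstSlot rest default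
  | none :: rest => firstSlot rest default

def pick_field_py_alt (row : List (String × String)) (candidates : List String) (default : String) : String :=
  let canon := candidates.map canonKey
  let canonset : PySem.Set String := PySem.Set.ofList canon
  let slots := row.foldl
                 (fun slots p =>
                   let ck := canonKey p.1
                   if ck ∈ canonset then updateSlots canon slots ck p.2 else slots)
                 (canon.map (fun _ => (none : Option String)))
  firstSlot slots default

-- ===== PRECONDITION & SPEC =====
def Spec_pick_field_py (row : List (String × String)) (candidates : List String) (default : String) (out : String) : Prop := out = pick_field_py_alt row candidates default
instance (row : List (String × String)) (candidates : List String) (default : String) (out : String) : Decidable (Spec_pick_field_py row candidates default out) := by unfold Spec_pick_field_py; infer_instance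

-- ===== CLAIM (what is proved, stated in full; the proofs are below) =====
def Claim_equal_pick_field_py : Prop := ∀ (row : List (String × String)) (candidates : List String) (default : String), Dom_pick_field_py row candidates default → Spec_pick_field_py row candidates default (pick_field_py row candidates default)

-- ===== LEMMAS AND PROOFS =====

-- the last row value whose canonical key is ck (characterises both programs)
def lastMatch (row : List (String × String)) (ck : String) : Option String :=
  row.foldl (fun acc p => if canonKey p.1 = ck then some p.2 else acc) none

theorem updateSlots_map (canon : List String) (f : String → Option String) (ck v : String) :
    updateSlots canon (canon.map f) ck v
      = canon.map (fun cc => if cc = ck then some v else f cc) := by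
  induction canon with
  | nil => rfl
  | cons c rest ih => simp [updateSlots, List.zip, List.map] at ih ⊢; exact ih

theorem slots_eq_lastMatch (row : List (String × String)) (canon : List String)
    (f : String → Option String) :
    row.foldl
        (fun slots p =>
          if canonKey p.1 ∈ PySem.Set.ofList canon then updateSlots canon slots (canonKey p.1) p.2 else slots)
        (canon.map f)
      = canon.map (fun cc => row.foldl (fun acc p => if canonKey p.1 = cc then some p.2 else acc) (f cc)) := by
  induction row generalizing f with
  | nil => rfl
  | cons p rest ih =>
    simp only [List.foldl_cons]
    by_cases hm : canonKey p.1 ∈ PySem.Set.ofList canon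
    · simp only [hm, if_pos, updateSlots_map]
      rw [ih]
      refine List.map_congr_left (fun cc _ => ?_)
      by_cases h : cc = canonKey p.1
      · simp [h]
      · simp [h, Ne.symm h]
    · rw [if_neg hm, ih]
      have hm' : canonKey p.1 ∉ canon := fun h => hm ((PySem.Set.mem_ofList _ _).mpr h)
      refine List.map_congr_left (fun cc hcc => ?_)
      have h : canonKey p.1 ≠ cc := fun h => hm' (h ▸ hcc)
      simp [h]

-- probing A's insert-built dict equals the last-match characterisation
theorem get?_foldl_insert_canon (row : List (String × String)) (d : PySem.Dict String String) (ck : String) :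
    (row.foldl (fun d p => d.insert (canonKey p.1) p.2) d).get? ck
      = row.foldl (fun acc p => if canonKey p.1 = ck then some p.2 else acc) (d.get? ck) := by
  induction row generalizing d with
  | nil => rfl
  | cons p rest ih =>
    simp only [List.foldl_cons, ih, PySem.Dict.get?_insert]
    by_cases h : canonKey p.1 = ck
    · simp [h]
    · simp [h, Ne.symm h]

theorem pickLoopA_eq_firstSlot (row : List (String × String)) (cs : List String) (default : String) :
    pickLoopA (row.foldl (fun d p => d.insert (canonKey p.1) p.2) PySem.Dict.empty) cs default
      = firstSlot ((cs.map canonKey).map (fun cc => lastMatch row cc)) default := by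
  induction cs with
  | nil => rfl
  | cons c rest ih =>
    simp only [pickLoopA, List.map_cons]
    rw [get?_foldl_insert_canon, ih]
    show (match lastMatch row (canonKey c) with
          | some v => if v ≠ "" then v else _
          | none => _) = firstSlot (lastMatch row (canonKey c) :: _) default
    cases lastMatch row (canonKey c) <;> simp [firstSlot]

-- B's result, characterised through lastMatch
theorem alt_char (row : List (String × String)) (cs : List String) (default : String) :
    pick_field_py_alt row cs default
      = firstSlot ((cs.map canonKey).map (fun cc => lastMatch row cc)) default := by
  simp only [pick_field_py_alt, slots_eq_lastMatch, lastMatch]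

-- ===== VERDICT (by name: the statement is the Claim_ definition above) =====
theorem pick_field_py_spec : Claim_equal_pick_field_py := by
  intro row candidates default _
  unfold Spec_pick_field_py
  rw [alt_char]
  cases candidates with
  | nil => rfl
  | cons c rest => simpa [pick_field_py] using pickLoopA_eq_firstSlot row (c :: rest) default
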